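-- pv_equiv track=rewrite | github.com/soumilk91/DS-Algo-In-Python | IK/Sorting_Problems/4_billion.py | find_integer
-- ===== SOURCE A (Python) =====
-- def find_integer(arr):
--     """
--     Args:
--      arr(list_int64)
--     Returns:
--      int64
--     """
--     # Write your code here.
--     result = 0
--     start = len(arr)
--
--     max_element = max(arr)
--
--     for i in range(start, max_element + 2):
--         if i not in arr:
--             result = i
--             break
--
--     return result
-- ===== SOURCE B (Python) =====
-- def find_integer(arr):
--     start = len(arr)
--     present = sorted(set(e for e in arr if e >= start))
--     expected = start
--     for e in present:
--         if e == expected: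
--             expected += 1
--         else:
--             break
--     return expected
-- ===== Notes on version B (the rewrite author's own statement) =====
-- stated objective: alternative
-- what changed: Replaces A's probe of every candidate i in range(len(arr), max(arr)+2) with an 'i in arr' membership scan by one sort of the deduplicated elements >= len(arr) followed by a single walk that advances an expected counter to the first gap.
-- intended difference: On nonempty lists whose elements are all < len(arr)-1 the loop range of A is empty and A returns its leftover sentinel 0, while B returns len(arr), the first missing integer >= len(arr), which is what the function is meant to find. — e.g. on find_integer([-5]): A returns 0, B returns 1
import Mathlib
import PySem

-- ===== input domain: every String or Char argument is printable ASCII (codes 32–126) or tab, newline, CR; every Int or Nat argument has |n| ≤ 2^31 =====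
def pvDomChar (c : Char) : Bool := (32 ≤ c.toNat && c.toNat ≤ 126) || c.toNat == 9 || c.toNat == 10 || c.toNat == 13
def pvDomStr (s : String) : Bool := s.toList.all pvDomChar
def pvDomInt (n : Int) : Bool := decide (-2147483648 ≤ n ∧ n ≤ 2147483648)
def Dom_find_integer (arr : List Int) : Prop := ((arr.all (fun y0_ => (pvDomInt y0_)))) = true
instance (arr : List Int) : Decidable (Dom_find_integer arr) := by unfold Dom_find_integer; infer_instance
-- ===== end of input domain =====

-- B replaces A's membership probe of every candidate integer with one sort of the
-- deduplicated elements ≥ len(arr) and a single counter walk to the first gap (alternative algorithm).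

-- ===== PORT A =====
-- the 'for i in range(start, max_element+2): if i not in arr: result = i; break' loop;
-- result starts at 0 and keeps that value if no iteration breaks
-- the counter i runs over range(start, max_element+2); the remaining iteration count is the
-- fuel (b - i).toNat, so the recursion stops exactly where the range ends (result stays 0)
def pvLoopA (arr : List Int) : Nat → Int → Int
  | 0, _ => 0
  | fuel + 1, i => if i ∈ arr then pvLoopA arr fuel (i + 1) else i

def find_integer (arr : List Int) : Int :=
  match PySem.List.max? arr (fun y => y) with
  | none => 0  -- unreachable under Pre_: Python's max([]) raises ValueError
  | some max_element => pvLoopA arr (max_element + 2 - (arr.length : Int)).toNat (arr.length : Int)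

-- ===== PORT B =====
-- 'for e in present: if e == expected: expected += 1 else: break; return expected'
def pvWalkB : List Int → Int → Int
  | [], expected => expected
  | e :: rest, expected => if e = expected then pvWalkB rest (expected + 1) else expected

def find_integer_alt (arr : List Int) : Int :=
  let start : Int := arr.length
  let present := PySem.List.sorted (PySem.Set.ofList (arr.filter (fun e => start ≤ e))) (fun y => y)
  pvWalkB present start

-- ===== PRECONDITION & SPEC =====
-- Pre_ excludes only the empty list, on which A raises ValueError from max(arr).
def Pre_find_integer (arr : List Int) : Prop := arr ≠ []
instance (arr : List Int) : Decidable (Pre_find_integer arr) := by unfold Pre_find_integer; infer_instance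
def pvWitness_find_integer : List Int := [0]

-- On nonempty lists whose elements are all < len(arr)-1, A's loop range is empty and A
-- returns its leftover sentinel 0, while B returns len(arr) — the first missing integer
-- ≥ len(arr), which is what the function is meant to find.
def D_find_integer (arr : List Int) : Prop := arr ≠ [] ∧ ∀ x ∈ arr, x < (arr.length : Int) - 1
instance (arr : List Int) : Decidable (D_find_integer arr) := by unfold D_find_integer; infer_instance

def Spec_find_integer (arr : List Int) (out : Int) : Prop := ¬ D_find_integer arr → out = find_integer_alt arr
instance (arr : List Int) (out : Int) : Decidable (Spec_find_integer arr out) := by unfold Spec_find_integer; infer_instance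

def pvDiffWitness_find_integer : List Int := [-5]
def pvDiffWitnessOut_find_integer : Int × Int := (0, 1)

-- ===== CLAIM (what is proved, stated in full; the proofs are below) =====
def Claim_unchanged_find_integer : Prop := ∀ (arr : List Int), Dom_find_integer arr → Pre_find_integer arr → Spec_find_integer arr (find_integer arr)
def Claim_changed_find_integer : Prop := Dom_find_integer (pvDiffWitness_find_integer) ∧ Pre_find_integer (pvDiffWitness_find_integer) ∧ D_find_integer (pvDiffWitness_find_integer) ∧ find_integer (pvDiffWitness_find_integer) = pvDiffWitnessOut_find_integer.1 ∧ find_integer_alt (pvDiffWitness_find_integer) = pvDiffWitnessOut_find_integer.2 ∧ pvDiffWitnessOut_find_integer.1 ≠ pvDiffWitnessOut_find_integer.2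
def Claim_exact_find_integer : Prop := ∀ (arr : List Int), Dom_find_integer arr → Pre_find_integer arr → D_find_integer arr → find_integer arr ≠ find_integer_alt arr

-- ===== LEMMAS AND PROOFS =====

-- A's loop returns the first i in [a, a+n) not in arr, provided such an i exists.
theorem pvLoopA_spec (arr : List Int) :
    ∀ (n : Nat) (a : Int),
    (∃ i, a ≤ i ∧ i < a + (n : Int) ∧ i ∉ arr) →
    a ≤ pvLoopA arr n a ∧ pvLoopA arr n a ∉ arr ∧
    ∀ j, a ≤ j → j < pvLoopA arr n a → j ∈ arr := by
  intro n
  induction n with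
  | zero =>
    intro a hex
    obtain ⟨i, hai, hib, _⟩ := hex
    omega
  | succ n ih =>
    intro a hex
    by_cases hmem : a ∈ arr
    · have hrec := ih (a + 1)
        (by
          obtain ⟨i, hai, hib, hni⟩ := hex
          refine ⟨i, ?_, by omega, hni⟩
          rcases eq_or_lt_of_le hai with heq | hlt
          · exact absurd hmem (heq ▸ hni)
          · omega)
      simp only [pvLoopA, if_pos hmem]
      refine ⟨by omega, hrec.2.1, ?_⟩
      intro j hj hjlt
      rcases eq_or_lt_of_le hj with heq | hlt
      · exact heq ▸ hmem
      · exact hrec.2.2 j (by omega) hjlt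
    · simp only [pvLoopA, if_neg hmem]
      exact ⟨le_refl a, hmem, by intro j h1 h2; omega⟩

-- B's walk over a strictly increasing list of values ≥ e returns the first gap ≥ e.
theorem pvWalkB_spec :
    ∀ (l : List Int) (e : Int), l.Pairwise (· < ·) → (∀ x ∈ l, e ≤ x) →
    e ≤ pvWalkB l e ∧ pvWalkB l e ∉ l ∧
    ∀ j, e ≤ j → j < pvWalkB l e → j ∈ l := by
  intro l
  induction l with
  | nil => intro e _ _; exact ⟨le_refl e, by simp [pvWalkB], by intro j h1 h2; simp [pvWalkB] at h2; omega⟩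
  | cons x rest ih =>
    intro e hpw hge
    have hxe : e ≤ x := hge x (List.mem_cons_self ..)
    have hrest_gt : ∀ y ∈ rest, x < y := (List.pairwise_cons.mp hpw).1
    by_cases hx : x = e
    · subst hx
      have hrec := ih (x + 1) (List.pairwise_cons.mp hpw).2
        (fun y hy => by have := hrest_gt y hy; omega)
      have hstep : pvWalkB (x :: rest) x = pvWalkB rest (x + 1) := by simp [pvWalkB]
      rw [hstep]
      refine ⟨by omega, ?_, ?_⟩
      · intro hmem
        rcases List.mem_cons.mp hmem with heq | hmemr
        · omega
        · exact hrec.2.1 hmemr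
      · intro j hj hjlt
        rcases eq_or_lt_of_le hj with heq | hlt
        · exact heq ▸ List.mem_cons_self ..
        · exact List.mem_cons_of_mem x (hrec.2.2 j (by omega) hjlt)
    · simp only [pvWalkB, if_neg hx]
      refine ⟨le_refl e, ?_, by intro j h1 h2; omega⟩
      intro hmem
      rcases List.mem_cons.mp hmem with heq | hmemr
      · exact hx heq.symm
      · have := hrest_gt e hmemr; omega

-- the list B walks: membership and strict sortedness
theorem pvPresent_mem (arr : List Int) (s x : Int) :
    x ∈ PySem.List.sorted (PySem.Set.ofList (arr.filter (fun e => s ≤ e))) (fun y => y) ↔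
      x ∈ arr ∧ s ≤ x := by
  rw [PySem.List.mem_sorted, PySem.Set.mem_ofList, List.mem_filter]
  simp

theorem pvPresent_sorted (arr : List Int) (s : Int) :
    (PySem.List.sorted (PySem.Set.ofList (arr.filter (fun e => s ≤ e))) (fun y => y)).Pairwise (· < ·) := by
  have hle := PySem.List.sorted_pairwise (PySem.Set.ofList (arr.filter (fun e => s ≤ e))) (fun y => y)
  have hnd : (PySem.List.sorted (PySem.Set.ofList (arr.filter (fun e => s ≤ e))) (fun y => y)).Nodup :=
    (PySem.List.sorted_perm _ _ _).nodup_iff.mpr (PySem.Set.nodup_ofList _)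
  exact (hle.and hnd).imp (fun h => lt_of_le_of_ne h.1 h.2)

-- inside D_ : A returns 0, B returns len(arr)
theorem pvD_values (arr : List Int) (hne : arr ≠ []) (hD : ∀ x ∈ arr, x < (arr.length : Int) - 1) :
    find_integer arr = 0 ∧ find_integer_alt arr = (arr.length : Int) := by
  obtain ⟨m, hm⟩ : ∃ m, PySem.List.max? arr (fun y => y) = some m := by
    cases h : PySem.List.max? arr (fun y => y) with
    | none => exact absurd ((PySem.List.max?_eq_none_iff arr _).mp h) hne
    | some m => exact ⟨m, rfl⟩
  constructor
  · have hmlt : m < (arr.length : Int) - 1 := hD m (PySem.List.max?_mem hm)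
    simp only [find_integer, hm]
    have : (m + 2 - (arr.length : Int)).toNat = 0 := by omega
    rw [this]
    rfl
  · have hfilter : arr.filter (fun e => (arr.length : Int) ≤ e) = [] := by
      rw [List.filter_eq_nil_iff]
      intro x hx
      have := hD x hx
      simp only [decide_eq_true_eq]
      omega
    simp only [find_integer_alt, hfilter]
    rfl

-- main agreement lemma outside D_
theorem pv_main (arr : List Int) (hne : arr ≠ []) (hnD : ¬ D_find_integer arr) :
    find_integer arr = find_integer_alt arr := by
  obtain ⟨m, hm⟩ : ∃ m, PySem.List.max? arr (fun y => y) = some m := by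
    cases h : PySem.List.max? arr (fun y => y) with
    | none => exact absurd ((PySem.List.max?_eq_none_iff arr _).mp h) hne
    | some m => exact ⟨m, rfl⟩
  have hmax : ∀ y ∈ arr, y ≤ m := PySem.List.max?_isMax hm
  -- since ¬D_, some element is ≥ len-1, hence len ≤ m+1
  have hbig : ∃ x ∈ arr, (arr.length : Int) - 1 ≤ x := by
    unfold D_find_integer at hnD
    push Not at hnD
    obtain ⟨x, hx, hxge⟩ := hnD hne
    exact ⟨x, hx, hxge⟩
  set s : Int := (arr.length : Int) with hs
  have hsm : s ≤ m + 1 := by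
    obtain ⟨x, hx, hxge⟩ := hbig
    have := hmax x hx; omega
  -- A side
  have hA := pvLoopA_spec arr (m + 2 - s).toNat s
    ⟨m + 1, by omega, by omega, fun hmem => by have := hmax (m + 1) hmem; omega⟩
  -- B side
  set present := PySem.List.sorted (PySem.Set.ofList (arr.filter (fun e => s ≤ e))) (fun y => y) with hp
  have hB := pvWalkB_spec present s (pvPresent_sorted arr s)
    (fun x hx => ((pvPresent_mem arr s x).mp hx).2)
  have hAval : find_integer arr = pvLoopA arr (m + 2 - s).toNat s := by
    simp only [find_integer, hm, ← hs]
  have hBval : find_integer_alt arr = pvWalkB present s := rfl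
  rw [hAval, hBval]
  set rA := pvLoopA arr (m + 2 - s).toNat s with hra
  set rB := pvWalkB present s with hrb
  rcases lt_trichotomy rA rB with hlt | heq | hgt
  · -- rA ∈ [s, rB) → rA ∈ present → rA ∈ arr, contradicting rA ∉ arr
    have := ((pvPresent_mem arr s rA).mp (hB.2.2 rA hA.1 hlt)).1
    exact absurd this hA.2.1
  · exact heq
  · -- rB ∈ [s, rA) → rB ∈ arr, but rB ∉ present while s ≤ rB
    have hmem := hA.2.2 rB hB.1 hgt
    have : rB ∈ present := (pvPresent_mem arr s rB).mpr ⟨hmem, hB.1⟩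
    exact absurd this hB.2.1

-- ===== VERDICT (by name: the statement is the Claim_ definition above) =====
theorem find_integer_spec : Claim_unchanged_find_integer := by
  intro arr _ hpre hnD
  exact (pv_main arr hpre hnD).symm ▸ rfl

theorem find_integer_changed : Claim_changed_find_integer := by
  unfold Claim_changed_find_integer; decide

theorem find_integer_tight : Claim_exact_find_integer := by
  intro arr _ hpre hD
  obtain ⟨hne, hall⟩ := hD
  obtain ⟨hA0, hBn⟩ := pvD_values arr hne hall
  rw [hA0, hBn]
  have : arr.length ≠ 0 := by simpa using hne
  omega
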